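-- pv_equiv track=rewrite | github.com/Marcelo-Henry/videostand | assets/skills/videostand/scripts/merge_videos.py | videos_are_compatible
-- ===== SOURCE A (Python) =====
-- def videos_are_compatible(infos: list[dict]) -> bool:
--     """Check if all videos share the same codec, resolution, frame rate, and pixel format."""
--     if not all(i["video"] for i in infos):
--         return False
--     codecs = {i["video"].get("codec_name") for i in infos}
--     sizes = {(i["video"].get("width"), i["video"].get("height")) for i in infos}
--     fps = {i["video"].get("r_frame_rate") for i in infos}
--     pix_fmts = {i["video"].get("pix_fmt") for i in infos}
--     return len(codecs) == 1 and len(sizes) == 1 and len(fps) == 1 and len(pix_fmts) == 1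
-- ===== SOURCE B (Python) =====
-- def videos_are_compatible(infos: list[dict]) -> bool:
--     """Check if all videos share the same codec, resolution, frame rate, and pixel format."""
--     if not infos or not all(i["video"] for i in infos):
--         return False
--
--     def sig(d):
--         return (d.get("codec_name"), d.get("width"), d.get("height"),
--                 d.get("r_frame_rate"), d.get("pix_fmt"))
--
--     ref = sig(infos[0]["video"])
--     return all(sig(i["video"]) == ref for i in infos[1:])
-- ===== Notes on version B (the rewrite author's own statement) =====
-- stated objective: simpler
-- what changed: Replaces A's four set-comprehension cardinality tests over all videos by taking the first video's attribute tuple as a reference and doing one short-circuiting scan comparing each video's tuple to it.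
import Mathlib
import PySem

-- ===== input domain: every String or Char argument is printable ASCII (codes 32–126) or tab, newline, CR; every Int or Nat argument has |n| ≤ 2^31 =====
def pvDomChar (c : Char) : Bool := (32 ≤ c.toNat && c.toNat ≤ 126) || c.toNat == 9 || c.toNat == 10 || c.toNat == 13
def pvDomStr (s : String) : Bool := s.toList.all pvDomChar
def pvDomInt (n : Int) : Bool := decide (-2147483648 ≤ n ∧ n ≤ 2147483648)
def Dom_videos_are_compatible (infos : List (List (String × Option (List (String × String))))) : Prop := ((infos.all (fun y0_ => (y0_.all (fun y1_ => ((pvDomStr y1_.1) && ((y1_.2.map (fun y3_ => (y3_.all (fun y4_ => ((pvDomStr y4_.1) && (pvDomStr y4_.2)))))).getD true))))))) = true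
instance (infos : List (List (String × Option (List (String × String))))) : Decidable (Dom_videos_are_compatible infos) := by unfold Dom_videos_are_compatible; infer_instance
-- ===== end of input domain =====

-- B replaces A's four set-cardinality tests by a single reference-tuple comparison against
-- the first video, short-circuiting on the first mismatch (objective: simpler).

-- shared dict primitives: i["video"] (first-match lookup; none = KeyError) and d.get(k)
def pvVideo (i : List (String × Option (List (String × String)))) :
    Option (Option (List (String × String))) := (PySem.Dict.mk i).get? "video"

def pvGet (d : List (String × String)) (k : String) : Option String := (PySem.Dict.mk d).get? k

-- Python truthiness of a value i["video"] : None and {} are falsy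
def pvTruthy (v : Option (List (String × String))) : Bool :=
  match v with
  | none => false
  | some [] => false
  | some (_ :: _) => true

-- ===== PORT A =====
def videos_are_compatible (infos : List (List (String × Option (List (String × String))))) : Bool :=
  -- if not all(i["video"] for i in infos): return False
  if !(infos.all fun i => pvTruthy ((pvVideo i).getD none)) then false
  else
    -- i["video"] (guaranteed present and truthy here; `.getD` defaults never fire under Pre_)
    let vids := infos.map fun i => ((pvVideo i).getD none).getD []
    let codecs := PySem.Set.ofList (vids.map fun v => pvGet v "codec_name")
    let sizes := PySem.Set.ofList (vids.map fun v => (pvGet v "width", pvGet v "height"))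
    let fps := PySem.Set.ofList (vids.map fun v => pvGet v "r_frame_rate")
    let pix_fmts := PySem.Set.ofList (vids.map fun v => pvGet v "pix_fmt")
    decide (PySem.Set.len codecs = 1 ∧ PySem.Set.len sizes = 1 ∧
            PySem.Set.len fps = 1 ∧ PySem.Set.len pix_fmts = 1)

-- ===== PORT B =====
-- sig(d) of Source B
def pvSig (d : List (String × String)) :
    Option String × Option String × Option String × Option String × Option String :=
  (pvGet d "codec_name", pvGet d "width", pvGet d "height",
   pvGet d "r_frame_rate", pvGet d "pix_fmt")

def videos_are_compatible_alt (infos : List (List (String × Option (List (String × String))))) : Bool :=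
  -- if not infos or not all(i["video"] for i in infos): return False
  if infos.isEmpty || !(infos.all fun i => pvTruthy ((pvVideo i).getD none)) then false
  else
    match infos with
    | [] => false  -- unreachable: isEmpty handled above
    | i0 :: rest =>
      -- ref = sig(infos[0]["video"]); all(sig(i["video"]) == ref for i in infos[1:])
      let ref := pvSig (((pvVideo i0).getD none).getD [])
      rest.all fun i => pvSig (((pvVideo i).getD none).getD []) == ref

-- ===== PRECONDITION & SPEC =====
-- Pre_ excludes exactly the inputs where Python A raises KeyError: some info lacks the
-- "video" key and no earlier info has a falsy "video" (the all() guard short-circuits).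
def Pre_videos_are_compatible (infos : List (List (String × Option (List (String × String))))) : Prop :=
  ∀ j, ∀ _ : j < infos.length, (pvVideo infos[j]).isSome = false →
    ∃ k, ∃ _ : k < j, ((pvVideo infos[k]).getD none |> pvTruthy) = false ∧ (pvVideo infos[k]).isSome = true
instance (infos : List (List (String × Option (List (String × String))))) : Decidable (Pre_videos_are_compatible infos) := by unfold Pre_videos_are_compatible; infer_instance

def pvWitness_videos_are_compatible : (List (List (String × Option (List (String × String))))) :=
  [[("video", some [("codec_name", "h264"), ("width", "640")])],
   [("video", some [("codec_name", "h264"), ("width", "640")])]]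

def Spec_videos_are_compatible (infos : List (List (String × Option (List (String × String))))) (out : Bool) : Prop := out = videos_are_compatible_alt infos
instance (infos : List (List (String × Option (List (String × String))))) (out : Bool) : Decidable (Spec_videos_are_compatible infos out) := by unfold Spec_videos_are_compatible; infer_instance

-- ===== CLAIM (what is proved, stated in full; the proofs are below) =====
def Claim_equal_videos_are_compatible : Prop := ∀ (infos : List (List (String × Option (List (String × String))))), Dom_videos_are_compatible infos → Pre_videos_are_compatible infos → Spec_videos_are_compatible infos (videos_are_compatible infos)

-- ===== LEMMAS AND PROOFS =====

-- growing the accumulator never shrinks a Set.add fold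
lemma pv_len_le_foldl_add {α : Type} [BEq α] (xs : List α) (s : PySem.Set α) :
    s.length ≤ (xs.foldl PySem.Set.add s).length := by
  induction xs generalizing s with
  | nil => simp
  | cons y ys ih =>
    simp only [List.foldl_cons]
    refine le_trans ?_ (ih (PySem.Set.add s y))
    simp only [PySem.Set.add]
    split <;> simp

-- a Set.add fold keeps the accumulator's length iff every element was already a member
lemma pv_foldl_add_len_eq_iff {α : Type} [BEq α] [LawfulBEq α] (xs : List α) (s : PySem.Set α) :
    (xs.foldl PySem.Set.add s).length = s.length ↔ ∀ y ∈ xs, y ∈ s := by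
  induction xs generalizing s with
  | nil => simp
  | cons y ys ih =>
    simp only [List.foldl_cons, List.mem_cons]
    by_cases hy : y ∈ s
    · have : PySem.Set.add s y = s := by
        simp [PySem.Set.add, hy]
      rw [this, ih]
      constructor
      · intro h z hz
        rcases hz with rfl | hz
        · exact hy
        · exact h z hz
      · intro h z hz; exact h z (Or.inr hz)
    · have hadd : PySem.Set.add s y = s ++ [y] := by
        simp only [PySem.Set.add]
        rw [if_neg]; simp [hy]
      rw [hadd]
      constructor
      · intro h
        exfalso
        have := pv_len_le_foldl_add ys (s ++ [y])
        simp only [List.length_append, List.length_cons, List.length_nil] at this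
        omega
      · intro h; exact absurd (h y (Or.inl rfl)) hy

-- set(x :: xs) is a singleton iff every element of xs equals x
lemma pv_set_singleton_iff {α : Type} [BEq α] [LawfulBEq α] (x : α) (xs : List α) :
    PySem.Set.len (PySem.Set.ofList (x :: xs)) = 1 ↔ ∀ y ∈ xs, y = x := by
  have h0 : PySem.Set.ofList (x :: xs) = xs.foldl PySem.Set.add [x] := by
    simp [PySem.Set.ofList, PySem.Set.add, PySem.Set.empty]
  have h1 : ([x] : List α).length = 1 := rfl
  rw [PySem.Set.len, h0]
  rw [show ((((xs.foldl PySem.Set.add [x]).length : Int) = 1) ↔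
      ((xs.foldl PySem.Set.add [x]).length = 1)) from by exact_mod_cast Iff.rfl]
  rw [← h1, pv_foldl_add_len_eq_iff]
  simp

-- ===== VERDICT (by name: the statement is the Claim_ definition above) =====
theorem videos_are_compatible_spec : Claim_equal_videos_are_compatible := by
  intro infos _ _
  unfold Spec_videos_are_compatible videos_are_compatible videos_are_compatible_alt
  by_cases hg : (infos.all fun i => pvTruthy ((pvVideo i).getD none)) = true
  · cases infos with
    | nil => simp
    | cons i0 rest =>
      rw [Bool.eq_iff_iff]
      simp only [hg, Bool.not_true, List.isEmpty_cons, Bool.false_or, Bool.false_eq_true,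
        if_false, List.map_cons, decide_eq_true_eq, List.all_eq_true]
      rw [pv_set_singleton_iff, pv_set_singleton_iff, pv_set_singleton_iff, pv_set_singleton_iff]
      simp only [List.mem_map, forall_exists_index, and_imp, forall_apply_eq_imp_iff₂,
        beq_iff_eq, pvSig, Prod.mk.injEq]
      exact ⟨fun ⟨hc, hs, hf, hp⟩ i hi => ⟨hc i hi, (hs i hi).1, (hs i hi).2, hf i hi, hp i hi⟩,
             fun h => ⟨fun i hi => (h i hi).1, fun i hi => ⟨(h i hi).2.1, (h i hi).2.2.1⟩,
                       fun i hi => (h i hi).2.2.2.1, fun i hi => (h i hi).2.2.2.2⟩⟩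
  · simp [hg]
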